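-- pv_equiv track=rewrite | github.com/atomicbomber-git/malay-sampa-code-generator | psedeocode.py | praproses
-- ===== SOURCE A (Python) =====
-- vokal = ['a', 'i', 'u', 'e', '@', 'o']
--
-- def praproses(kata):
--     result = []
--     tmp = ""
--     i=0
--     inkonsonan = False
--     numkonsonan = 0
--     for karakter in kata:
--         iskonsonan = (karakter not in vokal)
--         if iskonsonan:
--             if not inkonsonan:
--                 inkonsonan = True
--             numkonsonan += 1
--             tmp += karakter
--         else:
--             if inkonsonan:
--                 inkonsonan = False
--
--                 if len(tmp)==1:
--                     result += [tmp+karakter]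
--                 else:
--                     result += [tmp[0], tmp[1:]+karakter]
--                 tmp = ""
--             else:
--                 result += [karakter]
--     if len(tmp)>0:
--         result += [tmp]
--     return result
-- ===== SOURCE B (Python) =====
-- VOKAL = ('a', 'i', 'u', 'e', '@', 'o')
--
-- def praproses(kata):
--     # pass 1: tokenize into vowel tokens and maximal consonant-run tokens
--     tokens = []
--     i = 0
--     n = len(kata)
--     while i < n:
--         if kata[i] in VOKAL:
--             tokens.append((True, kata[i]))
--             i += 1
--         else:
--             j = i
--             while j < n and kata[j] not in VOKAL:
--                 j += 1
--             tokens.append((False, kata[i:j]))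
--             i = j
--     # pass 2: emit syllable groups from the token list
--     result = []
--     k = 0
--     m = len(tokens)
--     while k < m:
--         isv, s = tokens[k]
--         if isv:
--             result.append(s)
--             k += 1
--         elif k + 1 < m and tokens[k + 1][0]:
--             v = tokens[k + 1][1]
--             if len(s) == 1:
--                 result.append(s + v)
--             else:
--                 result.append(s[0])
--                 result.append(s[1:] + v)
--             k += 2
--         else:
--             result.append(s)
--             k += 1
--     return result
-- ===== Notes on version B (the rewrite author's own statement) =====
-- stated objective: alternative
-- what changed: Replaces A's single char-by-char state machine (inkonsonan flag + pending tmp buffer flushed on vowels and at the end) by two passes: first tokenize the word into vowel tokens and maximal consonant-run tokens, then walk the token list emitting a syllable group per run+vowel pair, lone vowel, or trailing run.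
import Mathlib
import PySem

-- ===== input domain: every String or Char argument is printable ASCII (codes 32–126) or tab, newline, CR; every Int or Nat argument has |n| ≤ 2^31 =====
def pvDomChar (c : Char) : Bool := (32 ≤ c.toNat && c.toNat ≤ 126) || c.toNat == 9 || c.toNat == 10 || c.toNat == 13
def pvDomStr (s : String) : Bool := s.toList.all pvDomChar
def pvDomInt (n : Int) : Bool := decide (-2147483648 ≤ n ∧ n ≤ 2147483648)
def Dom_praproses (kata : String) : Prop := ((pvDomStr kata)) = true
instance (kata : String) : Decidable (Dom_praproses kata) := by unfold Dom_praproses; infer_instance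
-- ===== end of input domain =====

-- B replaces A's single char-by-char state machine by two passes: tokenize into
-- vowel / maximal-consonant-run tokens, then emit syllable groups from the token
-- list (objective: alternative decomposition, same cost).

-- ===== PORT A =====
def vokal : List Char := ['a', 'i', 'u', 'e', '@', 'o']

-- state: (result, tmp, inkonsonan); numkonsonan and i are dead in A and dropped
def praprosesStep (st : List String × List Char × Bool) (karakter : Char) :
    List String × List Char × Bool :=
  let (result, tmp, inkonsonan) := st
  if karakter ∉ vokal then
    (result, tmp ++ [karakter], true)
  else
    if inkonsonan then
      (if tmp.length = 1 then result ++ [String.mk (tmp ++ [karakter])]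
       else result ++ [String.mk [tmp.headI], String.mk (tmp.tail ++ [karakter])],
       [], false)
    else
      (result ++ [String.mk [karakter]], tmp, false)

def praproses (kata : String) : List String :=
  let st := kata.toList.foldl praprosesStep ([], [], false)
  if st.2.1.length > 0 then st.1 ++ [String.mk st.2.1] else st.1

-- ===== PORT B =====
def isVok (c : Char) : Bool := c ∈ (['a', 'i', 'u', 'e', '@', 'o'] : List Char)

def tokenize : List Char → List (Bool × List Char)
  | [] => []
  | c :: cs =>
    if isVok c then (true, [c]) :: tokenize cs
    else
      (false, (c :: cs).takeWhile (fun x => ¬ isVok x)) ::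
        tokenize ((c :: cs).dropWhile (fun x => ¬ isVok x))
termination_by cs => cs.length
decreasing_by
  · simp
  · simp_all [List.dropWhile]
    exact List.length_dropWhile_le _ _

def emit : List (Bool × List Char) → List String
  | [] => []
  | (true, s) :: rest => String.mk s :: emit rest
  | (false, s) :: (true, v) :: rest =>
      (if s.length = 1 then [String.mk (s ++ v)]
       else [String.mk [s.headI], String.mk (s.tail ++ v)]) ++ emit rest
  | (false, s) :: rest => String.mk s :: emit rest

def praproses_alt (kata : String) : List String := emit (tokenize kata.toList)

-- ===== PRECONDITION & SPEC =====
def Spec_praproses (kata : String) (out : List String) : Prop := out = praproses_alt kata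
instance (kata : String) (out : List String) : Decidable (Spec_praproses kata out) := by unfold Spec_praproses; infer_instance

-- ===== CLAIM (what is proved, stated in full; the proofs are below) =====
def Claim_equal_praproses : Prop := ∀ (kata : String), Dom_praproses kata → Spec_praproses kata (praproses kata)

-- ===== LEMMAS AND PROOFS =====

-- common reference function: pending consonant run tmp, remaining characters
def g (tmp : List Char) : List Char → List String
  | [] => if tmp = [] then [] else [String.mk tmp]
  | c :: cs =>
    if ¬ isVok c then g (tmp ++ [c]) cs
    else if tmp = [] then String.mk [c] :: g [] cs
    else (if tmp.length = 1 then [String.mk (tmp ++ [c])]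
          else [String.mk [tmp.headI], String.mk (tmp.tail ++ [c])]) ++ g [] cs

theorem mem_vokal_iff (c : Char) : (c ∉ vokal) ↔ ¬ isVok c = true := by
  simp [vokal, isVok]

theorem foldA_eq_g (cs : List Char) : ∀ (result : List String) (tmp : List Char),
    (let st := cs.foldl praprosesStep (result, tmp, tmp ≠ [])
     if st.2.1.length > 0 then st.1 ++ [String.mk st.2.1] else st.1)
    = result ++ g tmp cs := by
  induction cs with
  | nil =>
    intro result tmp
    by_cases h : tmp = [] <;> simp [g, h]
  | cons c cs ih =>
    intro result tmp
    simp only [List.foldl_cons, g]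
    by_cases hv : isVok c
    · have hnm : ¬ (c ∉ vokal) := by simp [mem_vokal_iff, hv]
      by_cases ht : tmp = []
      · have hstep : praprosesStep (result, tmp, decide ¬tmp = []) c
            = (result ++ [String.mk [c]], [], false) := by
          simp [praprosesStep, hnm, ht]
        rw [hstep]
        have h2 := ih (result ++ [String.mk [c]]) []
        simp only [ne_eq, not_true_eq_false, decide_false] at h2
        rw [h2]
        simp [hv, ht]
      · by_cases hl : tmp.length = 1
        · have hstep : praprosesStep (result, tmp, decide ¬tmp = []) c
              = (result ++ [String.mk (tmp ++ [c])], [], false) := by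
            simp [praprosesStep, hnm, ht, hl]
          rw [hstep]
          have h2 := ih (result ++ [String.mk (tmp ++ [c])]) []
          simp only [ne_eq, not_true_eq_false, decide_false] at h2
          rw [h2]
          simp [hv, ht, hl]
        · have hstep : praprosesStep (result, tmp, decide ¬tmp = []) c
              = (result ++ [String.mk [tmp.headI], String.mk (tmp.tail ++ [c])], [], false) := by
            simp [praprosesStep, hnm, ht, hl]
          rw [hstep]
          have h2 := ih (result ++ [String.mk [tmp.headI], String.mk (tmp.tail ++ [c])]) []
          simp only [ne_eq, not_true_eq_false, decide_false] at h2
          rw [h2]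
          simp [hv, ht, hl]
    · have hmem : c ∉ vokal := (mem_vokal_iff c).mpr (by simp [hv])
      simp only [praprosesStep, if_pos hmem, if_pos (by simp [hv] : ¬ isVok c = true)]
      have := ih result (tmp ++ [c])
      simp only [ne_eq, List.append_ne_nil_of_right_ne_nil tmp (by simp : ([c] : List Char) ≠ []),
        not_false_iff] at this ⊢
      simpa using this

theorem g_run (run : List Char) (h : ∀ x ∈ run, ¬ isVok x) :
    ∀ (tmp : List Char) (rest : List Char), g tmp (run ++ rest) = g (tmp ++ run) rest := by
  induction run with
  | nil => simp
  | cons c cs ih =>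
    intro tmp rest
    have hc : ¬ isVok c := h c (by simp)
    simp only [List.cons_append, g, if_pos hc]
    rw [ih (fun x hx => h x (by simp [hx]))]
    simp

theorem emit_tokenize_eq_g_aux (n : Nat) : ∀ (cs : List Char), cs.length ≤ n →
    emit (tokenize cs) = g [] cs := by
  induction n with
  | zero =>
    intro cs h
    have : cs = [] := List.eq_nil_of_length_eq_zero (by omega)
    simp [this, tokenize, emit, g]
  | succ n ih =>
    intro cs hlen
    match cs with
    | [] => simp [tokenize, emit, g]  -- base
    | c :: cs =>
      by_cases hv : isVok c
      · rw [tokenize, if_pos hv, emit, ih cs (by simpa using Nat.le_of_succ_le_succ hlen), g]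
        simp [hv]
      · rw [tokenize, if_neg hv]
        obtain ⟨run, hrun⟩ : ∃ r, r = (c :: cs).takeWhile (fun x => ¬ isVok x) := ⟨_, rfl⟩
        obtain ⟨rest, hrest⟩ : ∃ r, r = (c :: cs).dropWhile (fun x => ¬ isVok x) := ⟨_, rfl⟩
        rw [← hrun, ← hrest]
        have hsplit : run ++ rest = c :: cs := by
          rw [hrun, hrest]; exact List.takeWhile_append_dropWhile
        have hallc : ∀ x ∈ run, ¬ isVok x := by
          intro x hx; rw [hrun] at hx; simpa using List.mem_takeWhile_imp hx
        have hrunne : run ≠ [] := by rw [hrun]; simp [List.takeWhile, hv]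
        have hg : g [] (c :: cs) = g run rest := by
          rw [← hsplit, g_run run hallc]; simp
        have hlen2 : run.length + rest.length = cs.length + 1 := by
          have := congrArg List.length hsplit
          simpa [List.length_append] using this
        have hr1 : 1 ≤ run.length := by
          cases run with
          | nil => exact absurd rfl hrunne
          | cons _ _ => simp
        cases rest with
        | nil =>
          rw [hg, g, if_neg hrunne]
          simp [tokenize, emit]
        | cons v rest' =>
          have hvv : isVok v := by
            have h1 := List.head?_dropWhile_not (fun x => ¬ isVok x) (c :: cs)
            rw [← hrest] at h1
            simpa using h1
          rw [tokenize, if_pos hvv, emit, hg, g, if_neg (by simp [hvv] : ¬ ¬ isVok v = true),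
            if_neg hrunne, ih rest' (by simp at hlen hlen2 ⊢; omega)]

theorem emit_tokenize_eq_g (cs : List Char) : emit (tokenize cs) = g [] cs :=
  emit_tokenize_eq_g_aux cs.length cs (le_refl _)

-- ===== VERDICT (by name: the statement is the Claim_ definition above) =====
theorem praproses_spec : Claim_equal_praproses := by
  intro kata _
  unfold Spec_praproses praproses praproses_alt
  rw [emit_tokenize_eq_g]
  simpa using foldA_eq_g kata.toList [] []
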